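-- pv_equiv track=rewrite | github.com/tamsinrogers/IdentifierSimilarity | code_snippets.py | func1_a
-- ===== SOURCE A (Python) =====
-- def func1_a(t):
--     a = ""
--     for u in t:
--         if u.isalpha():
--             # get ascii value of b
--             x = ord(u)
--             x -= 32
--             # convert ascii number to char
--             z = chr(x)
--             a += z
--         else:
--             a += u
--
--     return a
-- ===== SOURCE B (Python) =====
-- def func1_a(t):
--     table = {ord(c): ord(c) - 32 for c in set(t) if c.isalpha()}
--     return t.translate(table)
-- ===== Notes on version B (the rewrite author's own statement) =====
-- stated objective: idiomatic
-- what changed: Replaces the per-character string-concatenation loop by building a translation table (codepoint -> codepoint-32) from the distinct alphabetic characters of the input and applying str.translate in one C-level library pass.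
import Mathlib
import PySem

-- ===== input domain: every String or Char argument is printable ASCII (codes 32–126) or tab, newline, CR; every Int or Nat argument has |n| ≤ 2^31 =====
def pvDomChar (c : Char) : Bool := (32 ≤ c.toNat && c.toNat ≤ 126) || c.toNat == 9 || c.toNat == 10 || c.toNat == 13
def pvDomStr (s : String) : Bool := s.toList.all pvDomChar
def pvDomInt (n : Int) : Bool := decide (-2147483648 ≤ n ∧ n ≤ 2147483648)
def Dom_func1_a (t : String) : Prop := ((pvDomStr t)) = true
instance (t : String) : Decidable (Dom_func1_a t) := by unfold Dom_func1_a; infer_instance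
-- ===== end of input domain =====

-- B builds a translation table from the distinct alphabetic characters and maps it over the
-- string in one pass, instead of A's per-character accumulation loop (objective: idiomatic).

-- ===== PORT A =====
-- a = ""; for u in t: if u.isalpha(): a += chr(ord(u) - 32) else: a += u; return a
def func1_a (t : String) : String :=
  String.ofList (t.toList.foldl (fun a u =>
    if PySem.Chars.isalpha u then
      a ++ [Char.ofNat ((u.toNat : Int) - 32).toNat]
    else
      a ++ [u]) [])

-- ===== PORT B =====
-- table = {ord(c): ord(c) - 32 for c in set(t) if c.isalpha()}; return t.translate(table)
def func1_a_alt (t : String) : String :=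
  let table : PySem.Dict Int Int :=
    ((PySem.Set.ofList t.toList).filter (fun c => PySem.Chars.isalpha c)).foldl
      (fun d c => d.insert (c.toNat : Int) ((c.toNat : Int) - 32)) PySem.Dict.empty
  -- str.translate: each char is looked up by codepoint; absent keys pass through unchanged
  String.ofList (t.toList.map (fun c =>
    match table.get? (c.toNat : Int) with
    | some v => Char.ofNat v.toNat
    | none => c))

-- ===== PRECONDITION & SPEC =====
def Spec_func1_a (t : String) (out : String) : Prop := out = func1_a_alt t
instance (t : String) (out : String) : Decidable (Spec_func1_a t out) := by unfold Spec_func1_a; infer_instance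

-- ===== CLAIM (what is proved, stated in full; the proofs are below) =====
def Claim_equal_func1_a : Prop := ∀ (t : String), Dom_func1_a t → Spec_func1_a t (func1_a t)

-- ===== LEMMAS AND PROOFS =====

theorem pv_key_inj {c h : Char} (hk : (c.toNat : Int) = (h.toNat : Int)) : c = h := by
  have : c.toNat = h.toNat := by exact_mod_cast hk
  apply Char.ext; apply UInt32.toBitVec_inj.mp; apply BitVec.toNat_inj.mp; exact this

-- lookup in the table built by folding inserts over the alpha-filtered distinct chars
theorem pv_table_get (l : List Char) (d : PySem.Dict Int Int) (c : Char) :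
    ((l.filter (fun c => PySem.Chars.isalpha c)).foldl
      (fun d c => d.insert (c.toNat : Int) ((c.toNat : Int) - 32)) d).get? (c.toNat : Int)
    = if c ∈ l ∧ PySem.Chars.isalpha c then some ((c.toNat : Int) - 32)
      else d.get? (c.toNat : Int) := by
  induction l generalizing d with
  | nil => simp
  | cons h tl ih =>
    by_cases ha : PySem.Chars.isalpha h
    · rw [List.filter_cons_of_pos ha, List.foldl_cons, ih]
      by_cases hmem : c ∈ tl ∧ PySem.Chars.isalpha c
      · simp [hmem]
      · rw [if_neg hmem, PySem.Dict.get?_insert]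
        by_cases hc : c = h
        · subst hc; simp [ha]
        · rw [if_neg (fun hk => hc (pv_key_inj hk)), if_neg]
          intro hx
          rcases List.mem_cons.mp hx.1 with h1 | h2
          · exact hc h1
          · exact hmem ⟨h2, hx.2⟩
    · rw [List.filter_cons_of_neg (by simpa using ha), ih]
      have hiff : (c ∈ h :: tl ∧ PySem.Chars.isalpha c = true) ↔ (c ∈ tl ∧ PySem.Chars.isalpha c = true) := by
        constructor
        · rintro ⟨hmm, hal⟩
          rcases List.mem_cons.mp hmm with h1 | h2
          · exact absurd (h1 ▸ hal) (by simpa using ha)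
          · exact ⟨h2, hal⟩
        · rintro ⟨hm, hal⟩; exact ⟨List.mem_cons_of_mem _ hm, hal⟩
      simp only [hiff]

theorem pv_foldl_append (l : List Char) (acc : List Char) :
    l.foldl (fun a u => if PySem.Chars.isalpha u then a ++ [Char.ofNat ((u.toNat : Int) - 32).toNat] else a ++ [u]) acc
    = acc ++ l.map (fun u => if PySem.Chars.isalpha u then Char.ofNat ((u.toNat : Int) - 32).toNat else u) := by
  induction l generalizing acc with
  | nil => simp
  | cons h tl ih =>
    simp only [List.foldl_cons, List.map_cons]
    by_cases ha : PySem.Chars.isalpha h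
    · rw [if_pos ha, ih, if_pos ha]; simp
    · rw [if_neg ha, ih, if_neg ha]; simp

-- ===== VERDICT (by name: the statement is the Claim_ definition above) =====
theorem func1_a_spec : Claim_equal_func1_a := by
  intro t _
  unfold Spec_func1_a func1_a func1_a_alt
  rw [pv_foldl_append]
  simp only [List.nil_append]
  congr 1
  apply List.map_congr_left
  intro c hc
  have hmem : c ∈ PySem.Set.ofList t.toList := by
    simpa [PySem.Set.mem_ofList] using hc
  rw [pv_table_get]
  by_cases ha : PySem.Chars.isalpha c
  · simp [ha, hmem]
  · simp [ha]
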